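-- pv_equiv track=rewrite | github.com/hiericho/kickerino | emote_manager.py | _select_7tv_emote_file
-- ===== SOURCE A (Python) =====
-- def _select_7tv_emote_file(files: list) -> dict | None:
--     """Selects preferred emote file (e.g., 1x WEBP)."""
--     chosen_file = None
--     # Prioritize 1x static formats first for simplicity with PhotoImage
--     for f_format in ["WEBP", "PNG"]: # Static preferred
--         for f_size_prefix in ["1x", "2x"]:
--             for file_info in files:
--                 if file_info.get("name", "").startswith(f_size_prefix) and \
--                    file_info.get("format") == f_format:
--                     chosen_file = file_info
--                     return chosen_file # Return as soon as preferred static is found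
--     # Fallback to AVIF or GIF if static WEBP/PNG not found
--     for f_format in ["AVIF", "GIF"]:
--         for f_size_prefix in ["1x", "2x"]:
--             for file_info in files:
--                 if file_info.get("name", "").startswith(f_size_prefix) and \
--                    file_info.get("format") == f_format:
--                     chosen_file = file_info
--                     return chosen_file
--     if not chosen_file and files: chosen_file = files[0] # Absolute fallback
--     return chosen_file
-- ===== SOURCE B (Python) =====
-- def _fmt_rank(file_info):
--     fmt = file_info.get("format")
--     if fmt == "WEBP":
--         return 0
--     elif fmt == "PNG":
--         return 1
--     elif fmt == "AVIF":
--         return 2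
--     elif fmt == "GIF":
--         return 3
--     else:
--         return None
--
-- def _size_rank(file_info):
--     if file_info.get("name", "").startswith("1x"):
--         return 0
--     elif file_info.get("name", "").startswith("2x"):
--         return 1
--     else:
--         return None
--
-- def _priority(file_info):
--     fr = _fmt_rank(file_info)
--     sr = _size_rank(file_info)
--     if fr is None or sr is None:
--         return None
--     return fr * 2 + sr
--
-- def _select_7tv_emote_file(files: list) -> dict | None:
--     """Selects preferred emote file: one pass keeping the lowest-priority match."""
--     best = None  # (priority, file_info)
--     for file_info in files:
--         p = _priority(file_info)
--         if p is None:
--             continue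
--         if best is None or p < best[0]:
--             best = (p, file_info)
--     if best is not None:
--         return best[1]
--     return files[0] if files else None
-- ===== Notes on version B (the rewrite author's own statement) =====
-- stated objective: alternative
-- what changed: Replaces A's eight successive scans of the file list (one per format/size combination, in two hard-coded blocks) by a single pass that assigns each file a numeric priority (format_rank*2 + size_rank) and keeps the first file attaining the strictly smallest priority, with the same files[0]/None fallback.
import Mathlib
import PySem

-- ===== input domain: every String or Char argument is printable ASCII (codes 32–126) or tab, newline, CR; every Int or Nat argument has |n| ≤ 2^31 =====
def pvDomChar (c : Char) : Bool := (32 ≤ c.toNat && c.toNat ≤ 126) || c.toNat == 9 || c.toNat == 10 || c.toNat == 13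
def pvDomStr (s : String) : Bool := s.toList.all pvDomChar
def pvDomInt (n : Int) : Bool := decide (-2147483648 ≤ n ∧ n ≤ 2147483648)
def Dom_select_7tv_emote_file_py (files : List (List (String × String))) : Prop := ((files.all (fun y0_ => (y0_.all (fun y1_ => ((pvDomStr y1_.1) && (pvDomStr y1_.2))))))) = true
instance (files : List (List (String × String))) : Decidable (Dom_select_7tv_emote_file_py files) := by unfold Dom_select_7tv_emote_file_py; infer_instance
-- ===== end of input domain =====

-- B replaces A's eight successive scans of the file list by one pass keeping the
-- lowest-priority match (objective: alternative single-pass algorithm, same cost class).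

-- ===== PORT A =====
-- file_info.get("name","") / file_info.get("format"): dicts are given as assoc lists; a Python dict built
-- from them is PySem.Dict.ofList, lookups are get?/getD.
def aMatch (fi : List (String × String)) (pfx fmt : String) : Bool :=
  PySem.Str.startswith ((PySem.Dict.ofList fi).getD "name" "") pfx
    && ((PySem.Dict.ofList fi).get? "format" == some fmt)

-- the two nested for-loops over (format, size-prefix) with an inner first-match scan and early return
def aScanPairs (files : List (List (String × String))) (pairs : List (String × String)) :
    Option (List (String × String)) :=
  match pairs with
  | [] => none
  | (fmt, pfx) :: rest =>
    match files.find? (fun fi => aMatch fi pfx fmt) with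
    | some fi => some fi
    | none => aScanPairs files rest

def select_7tv_emote_file_py (files : List (List (String × String))) : Option (List (String × String)) :=
  match aScanPairs files [("WEBP", "1x"), ("WEBP", "2x"), ("PNG", "1x"), ("PNG", "2x")] with
  | some fi => some fi
  | none =>
    match aScanPairs files [("AVIF", "1x"), ("AVIF", "2x"), ("GIF", "1x"), ("GIF", "2x")] with
    | some fi => some fi
    | none => files.head?   -- 'if not chosen_file and files: chosen_file = files[0]'

-- ===== PORT B =====
-- priority of a file: format_rank*2 + size_rank; none = ineligible
def fmtRankOf (fi : List (String × String)) : Option Nat :=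
  match (PySem.Dict.ofList fi).get? "format" with
  | none => none
  | some f =>
    if f == "WEBP" then some 0
    else if f == "PNG" then some 1
    else if f == "AVIF" then some 2
    else if f == "GIF" then some 3
    else none

def sizeRankOf (fi : List (String × String)) : Option Nat :=
  if PySem.Str.startswith ((PySem.Dict.ofList fi).getD "name" "") "1x" then some 0
  else if PySem.Str.startswith ((PySem.Dict.ofList fi).getD "name" "") "2x" then some 1
  else none

def prioB (fi : List (String × String)) : Option Nat :=
  match fmtRankOf fi, sizeRankOf fi with
  | some fr, some sr => some (fr * 2 + sr)
  | _, _ => none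

-- one loop step: keep the first file attaining the strictly smallest priority
def bStep (best : Option (Nat × List (String × String))) (fi : List (String × String)) :
    Option (Nat × List (String × String)) :=
  match prioB fi with
  | none => best
  | some p =>
    match best with
    | none => some (p, fi)
    | some (bp, bf) => if p < bp then some (p, fi) else some (bp, bf)

def select_7tv_emote_file_py_alt (files : List (List (String × String))) : Option (List (String × String)) :=
  match files.foldl bStep none with
  | some (_, bf) => some bf
  | none => files.head?

-- ===== PRECONDITION & SPEC =====
def Spec_select_7tv_emote_file_py (files : List (List (String × String))) (out : Option (List (String × String))) : Prop := out = select_7tv_emote_file_py_alt files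
instance (files : List (List (String × String))) (out : Option (List (String × String))) : Decidable (Spec_select_7tv_emote_file_py files out) := by unfold Spec_select_7tv_emote_file_py; infer_instance

-- ===== CLAIM (what is proved, stated in full; the proofs are below) =====
def Claim_equal_select_7tv_emote_file_py : Prop := ∀ (files : List (List (String × String))), Dom_select_7tv_emote_file_py files → Spec_select_7tv_emote_file_py files (select_7tv_emote_file_py files)

-- ===== LEMMAS AND PROOFS =====

-- first file whose priority is some p, trying p = 0, 1, …, n-1 in order
def chainUpto (files : List (List (String × String))) : Nat → Option (List (String × String))
  | 0 => none
  | n + 1 => (chainUpto files n).orElse (fun _ => files.find? (fun fi => prioB fi == some n))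

theorem chain_nil : ∀ q, chainUpto [] q = none := by
  intro q; induction q with
  | zero => rfl
  | succ n ih => simp [chainUpto, ih]

theorem prioB_lt8 {fi : List (String × String)} {r : Nat} (h : prioB fi = some r) : r < 8 := by
  unfold prioB at h
  split at h
  case _ fr sr hf hs =>
    unfold fmtRankOf at hf; unfold sizeRankOf at hs
    split at hf
    · exact absurd hf (by simp)
    · split_ifs at hf <;> split_ifs at hs <;>
        injection hf with hf <;> injection hs with hs <;> injection h with h <;> omega
  · simp_all

theorem sw_excl (s : String) (h : PySem.Str.startswith s "1x" = true) :
    PySem.Str.startswith s "2x" = false := by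
  simp only [PySem.Str.startswith_eq] at h ⊢
  have h1 : ('1' :: 'x' :: []) <+: s.toList := (PySem.Chars.startswith_iff _ _).mp h
  cases hb : PySem.Chars.startswith s.toList "2x".toList with
  | false => rfl
  | true =>
    have h2 : ('2' :: 'x' :: []) <+: s.toList := (PySem.Chars.startswith_iff _ _).mp hb
    obtain ⟨t, ht⟩ := h1
    rw [← ht] at h2
    rcases (List.cons_prefix_cons.mp h2) with ⟨h21, -⟩
    exact absurd h21 (by decide)

-- aMatch for each of A's eight (format, prefix) pairs is exactly 'priority = p'
theorem aMatch_eq_prio (fi : List (String × String)) :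
    (aMatch fi "1x" "WEBP" = (prioB fi == some 0)) ∧
    (aMatch fi "2x" "WEBP" = (prioB fi == some 1)) ∧
    (aMatch fi "1x" "PNG" = (prioB fi == some 2)) ∧
    (aMatch fi "2x" "PNG" = (prioB fi == some 3)) ∧
    (aMatch fi "1x" "AVIF" = (prioB fi == some 4)) ∧
    (aMatch fi "2x" "AVIF" = (prioB fi == some 5)) ∧
    (aMatch fi "1x" "GIF" = (prioB fi == some 6)) ∧
    (aMatch fi "2x" "GIF" = (prioB fi == some 7)) := by
  have hsw := sw_excl ((PySem.Dict.ofList fi).getD "name" "")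
  refine ⟨?_, ?_, ?_, ?_, ?_, ?_, ?_, ?_⟩ <;>
    (unfold aMatch prioB fmtRankOf sizeRankOf
     cases hf : (PySem.Dict.ofList fi).get? "format" <;>
       cases h1 : PySem.Str.startswith ((PySem.Dict.ofList fi).getD "name" "") "1x" <;>
       cases h2 : PySem.Str.startswith ((PySem.Dict.ofList fi).getD "name" "") "2x" <;>
       first
         | (exfalso; have := hsw h1; rw [this] at h2; exact Bool.false_ne_true h2)
         | (simp_all; try (split_ifs <;> simp_all)))

theorem scanA_eq_chain (files : List (List (String × String))) :
    select_7tv_emote_file_py files =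
      match chainUpto files 8 with
      | some fi => some fi
      | none => files.head? := by
  have e0 : (fun fi => aMatch fi "1x" "WEBP") = (fun fi => prioB fi == some 0) := funext fun fi => (aMatch_eq_prio fi).1
  have e1 : (fun fi => aMatch fi "2x" "WEBP") = (fun fi => prioB fi == some 1) := funext fun fi => (aMatch_eq_prio fi).2.1
  have e2 : (fun fi => aMatch fi "1x" "PNG") = (fun fi => prioB fi == some 2) := funext fun fi => (aMatch_eq_prio fi).2.2.1
  have e3 : (fun fi => aMatch fi "2x" "PNG") = (fun fi => prioB fi == some 3) := funext fun fi => (aMatch_eq_prio fi).2.2.2.1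
  have e4 : (fun fi => aMatch fi "1x" "AVIF") = (fun fi => prioB fi == some 4) := funext fun fi => (aMatch_eq_prio fi).2.2.2.2.1
  have e5 : (fun fi => aMatch fi "2x" "AVIF") = (fun fi => prioB fi == some 5) := funext fun fi => (aMatch_eq_prio fi).2.2.2.2.2.1
  have e6 : (fun fi => aMatch fi "1x" "GIF") = (fun fi => prioB fi == some 6) := funext fun fi => (aMatch_eq_prio fi).2.2.2.2.2.2.1
  have e7 : (fun fi => aMatch fi "2x" "GIF") = (fun fi => prioB fi == some 7) := funext fun fi => (aMatch_eq_prio fi).2.2.2.2.2.2.2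
  have c8 : chainUpto files 8 = (chainUpto files 7).orElse (fun _ => files.find? (fun fi => prioB fi == some 7)) := rfl
  have c7 : chainUpto files 7 = (chainUpto files 6).orElse (fun _ => files.find? (fun fi => prioB fi == some 6)) := rfl
  have c6 : chainUpto files 6 = (chainUpto files 5).orElse (fun _ => files.find? (fun fi => prioB fi == some 5)) := rfl
  have c5 : chainUpto files 5 = (chainUpto files 4).orElse (fun _ => files.find? (fun fi => prioB fi == some 4)) := rfl
  have c4 : chainUpto files 4 = (chainUpto files 3).orElse (fun _ => files.find? (fun fi => prioB fi == some 3)) := rfl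
  have c3 : chainUpto files 3 = (chainUpto files 2).orElse (fun _ => files.find? (fun fi => prioB fi == some 2)) := rfl
  have c2 : chainUpto files 2 = (chainUpto files 1).orElse (fun _ => files.find? (fun fi => prioB fi == some 1)) := rfl
  have c1 : chainUpto files 1 = (chainUpto files 0).orElse (fun _ => files.find? (fun fi => prioB fi == some 0)) := rfl
  rw [c8, c7, c6, c5, c4, c3, c2, c1]
  simp only [select_7tv_emote_file_py, aScanPairs, e0, e1, e2, e3, e4, e5, e6, e7, chainUpto]
  cases hg0 : files.find? (fun fi => prioB fi == some 0) with
  | some f => simp [Option.orElse]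
  | none =>
    simp only [Option.orElse]
    cases hg1 : files.find? (fun fi => prioB fi == some 1) with
    | some f => simp
    | none =>
      cases hg2 : files.find? (fun fi => prioB fi == some 2) with
      | some f => simp
      | none =>
        cases hg3 : files.find? (fun fi => prioB fi == some 3) with
        | some f => simp
        | none =>
          cases hg4 : files.find? (fun fi => prioB fi == some 4) with
          | some f => simp
          | none =>
            cases hg5 : files.find? (fun fi => prioB fi == some 5) with
            | some f => simp
            | none =>
              cases hg6 : files.find? (fun fi => prioB fi == some 6) with
              | some f => simp
              | none =>
                cases hg7 : files.find? (fun fi => prioB fi == some 7) with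
                | some f => simp
                | none =>
                  rfl

theorem chain_cons_none {fi : List (String × String)} (rest : List (List (String × String)))
    (hp : prioB fi = none) : ∀ q, chainUpto (fi :: rest) q = chainUpto rest q := by
  intro q; induction q with
  | zero => rfl
  | succ n ih => simp [chainUpto, ih, List.find?, hp]

theorem chain_cons_some {fi : List (String × String)} (rest : List (List (String × String)))
    {r : Nat} (hp : prioB fi = some r) : ∀ q, chainUpto (fi :: rest) q =
      if r < q then some ((chainUpto rest r).getD fi) else chainUpto rest q := by
  intro q; induction q with
  | zero => simp [chainUpto]
  | succ n ih =>
    have hfind : (fi :: rest).find? (fun g => prioB g == some n) =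
        if r = n then some fi else rest.find? (fun g => prioB g == some n) := by
      have hb : (r == n) = decide (r = n) := by cases hd : decide (r = n) <;> simp_all
      by_cases h : r = n <;> simp [List.find?, hp, hb, h]
    by_cases h1 : r < n
    · have h2 : r < n + 1 := by omega
      simp [chainUpto, ih, h1, h2, Option.orElse]
    · by_cases h2 : r = n
      · subst h2
        simp only [chainUpto, ih, hfind, if_neg h1, if_pos (Nat.lt_succ_self r)]
        cases hcr : chainUpto rest r <;> simp [Option.orElse]
      · have h3 : ¬ r < n + 1 := by omega
        simp [chainUpto, ih, h1, h2, h3, hfind, Option.orElse]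

theorem foldl_some (files : List (List (String × String))) : ∀ (q : Nat) (f : List (String × String)),
    Option.map Prod.snd (files.foldl bStep (some (q, f))) = some ((chainUpto files q).getD f) := by
  induction files with
  | nil => intro q f; simp [chain_nil]
  | cons fi rest ih =>
    intro q f
    cases hp : prioB fi with
    | none => simp [List.foldl, bStep, hp, ih, chain_cons_none rest hp]
    | some r =>
      by_cases h : r < q
      · simp [List.foldl, bStep, hp, h, ih, chain_cons_some rest hp]
      · simp [List.foldl, bStep, hp, h, ih, chain_cons_some rest hp]

theorem foldl_none (files : List (List (String × String))) :
    Option.map Prod.snd (files.foldl bStep none) = chainUpto files 8 := by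
  induction files with
  | nil => simp [chain_nil]
  | cons fi rest ih =>
    cases hp : prioB fi with
    | none => simp [List.foldl, bStep, hp, ih, chain_cons_none rest hp]
    | some r =>
      have h8 : r < 8 := prioB_lt8 hp
      simp [List.foldl, bStep, hp, foldl_some, chain_cons_some rest hp, h8]

-- ===== VERDICT (by name: the statement is the Claim_ definition above) =====
theorem select_7tv_emote_file_py_spec : Claim_equal_select_7tv_emote_file_py := by
  intro files _
  unfold Spec_select_7tv_emote_file_py
  rw [scanA_eq_chain files, ← foldl_none files]
  unfold select_7tv_emote_file_py_alt
  cases h : files.foldl bStep none with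
  | none => rfl
  | some pf => cases pf with | mk p bf => rfl
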